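-- pv_equiv track=rewrite | github.com/JimothyJohn/datasheetminer | datasheetminer/pricing/resolver.py | source_name_for_domain
-- ===== SOURCE A (Python) =====
-- _OEM_DOMAINS: dict[str, str] = {
--     "orientalmotor.com": "Oriental Motor",
--     "maxongroup.com": "Maxon Group",
--     "automationdirect.com": "AutomationDirect",
--     "se.com": "Schneider Electric",
--     # Mitsubishi's US factory-automation store publishes JSON-LD list prices
--     # per part number. Confirmed live on HG-KR43.
--     "shop1.us.mitsubishielectric.com": "Mitsubishi Electric (official store)",
-- }
--
-- _DISTRIBUTOR_DOMAINS: dict[str, str] = {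
--     "galco.com": "Galco",
--     "wolfautomation.com": "Wolf Automation",
--     "motionindustries.com": "Motion Industries",
--     "newark.com": "Newark",
--     "alliedelec.com": "Allied Electronics",
--     "grainger.com": "Grainger",
--     # Kyklo-backed storefronts. Same JSON-LD Product.offers.price scheme
--     # as shop1.us.mitsubishielectric.com; URL pattern is /products/{pn}
--     # with a redirect to / when the part isn't carried (handled by the
--     # fetcher's redirect-to-root guard).
--     "shop.iecsupply.com": "IEC Supply",  # Phoenix Contact, Rittal
--     "shop.lakewoodautomation.com": "Lakewood Automation",  # Omron, Wago
--     "shop.lakelandengineering.com": "Lakeland Engineering",  # ABB, Crouzet, Dynapar, Marathon Special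
--     "shop.fabco-air.com": "Fabco-Air",  # fluid power + Fabco-Air own brand
-- }
--
-- _AGGREGATOR_DOMAINS: dict[str, str] = {
--     "radwell.com": "Radwell International",
--     "plccenter.com": "PLC Center",
-- }
--
-- def source_name_for_domain(netloc: str) -> str:
--     host = netloc.lower().lstrip(".")
--     if host.startswith("www."):
--         host = host[4:]
--     for d, name in {
--         **_OEM_DOMAINS,
--         **_DISTRIBUTOR_DOMAINS,
--         **_AGGREGATOR_DOMAINS,
--     }.items():
--         if host == d or host.endswith("." + d):
--             return name
--     return host
-- ===== SOURCE B (Python) =====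
-- _OEM_DOMAINS: dict[str, str] = {
--     "orientalmotor.com": "Oriental Motor",
--     "maxongroup.com": "Maxon Group",
--     "automationdirect.com": "AutomationDirect",
--     "se.com": "Schneider Electric",
--     "shop1.us.mitsubishielectric.com": "Mitsubishi Electric (official store)",
-- }
--
-- _DISTRIBUTOR_DOMAINS: dict[str, str] = {
--     "galco.com": "Galco",
--     "wolfautomation.com": "Wolf Automation",
--     "motionindustries.com": "Motion Industries",
--     "newark.com": "Newark",
--     "alliedelec.com": "Allied Electronics",
--     "grainger.com": "Grainger",
--     "shop.iecsupply.com": "IEC Supply",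
--     "shop.lakewoodautomation.com": "Lakewood Automation",
--     "shop.lakelandengineering.com": "Lakeland Engineering",
--     "shop.fabco-air.com": "Fabco-Air",
-- }
--
-- _AGGREGATOR_DOMAINS: dict[str, str] = {
--     "radwell.com": "Radwell International",
--     "plccenter.com": "PLC Center",
-- }
--
-- # Merged once at import time; the function walks the host's label-boundary
-- # suffixes (most specific first) and looks each up in this dict.
-- _ALL_DOMAINS: dict[str, str] = {
--     **_OEM_DOMAINS,
--     **_DISTRIBUTOR_DOMAINS,
--     **_AGGREGATOR_DOMAINS,
-- }
--
--
-- def source_name_for_domain(netloc: str) -> str: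
--     host = netloc.lower().lstrip(".")
--     if host.startswith("www."):
--         host = host[4:]
--     cand = host
--     while True:
--         name = _ALL_DOMAINS.get(cand)
--         if name is not None:
--             return name
--         dot = cand.find(".")
--         if dot == -1:
--             return host
--         cand = cand[dot + 1:]
-- ===== Notes on version B (the rewrite author's own statement) =====
-- stated objective: idiomatic
-- what changed: B merges the three domain dicts once at module load and, after the same normalization, walks the host's label-boundary suffixes most-specific-first with a dict lookup, instead of scanning every configured domain with endswith.
import Mathlib
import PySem

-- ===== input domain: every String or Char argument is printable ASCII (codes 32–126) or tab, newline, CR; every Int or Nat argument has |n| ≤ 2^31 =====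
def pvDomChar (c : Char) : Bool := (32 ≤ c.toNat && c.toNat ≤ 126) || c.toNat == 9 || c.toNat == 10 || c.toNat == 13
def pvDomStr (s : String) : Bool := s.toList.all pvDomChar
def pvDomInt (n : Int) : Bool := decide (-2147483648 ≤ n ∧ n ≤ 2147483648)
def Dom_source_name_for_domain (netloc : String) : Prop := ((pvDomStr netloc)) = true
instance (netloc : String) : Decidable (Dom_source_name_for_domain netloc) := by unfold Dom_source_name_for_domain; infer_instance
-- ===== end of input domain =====

-- B precomputes the merged domain->name mapping once and walks the host's
-- label-boundary suffixes (most specific first) with a dict lookup, instead of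
-- scanning every configured domain with endswith.  Objective: idiomatic/alternative.


-- ===== PORT A =====
def pvOEM : List (List Char × String) :=
  [("orientalmotor.com".toList, "Oriental Motor"),
   ("maxongroup.com".toList, "Maxon Group"),
   ("automationdirect.com".toList, "AutomationDirect"),
   ("se.com".toList, "Schneider Electric"),
   ("shop1.us.mitsubishielectric.com".toList, "Mitsubishi Electric (official store)")]

def pvDIST : List (List Char × String) :=
  [("galco.com".toList, "Galco"),
   ("wolfautomation.com".toList, "Wolf Automation"),
   ("motionindustries.com".toList, "Motion Industries"),
   ("newark.com".toList, "Newark"),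
   ("alliedelec.com".toList, "Allied Electronics"),
   ("grainger.com".toList, "Grainger"),
   ("shop.iecsupply.com".toList, "IEC Supply"),
   ("shop.lakewoodautomation.com".toList, "Lakewood Automation"),
   ("shop.lakelandengineering.com".toList, "Lakeland Engineering"),
   ("shop.fabco-air.com".toList, "Fabco-Air")]

def pvAGG : List (List Char × String) :=
  [("radwell.com".toList, "Radwell International"),
   ("plccenter.com".toList, "PLC Center")]

-- the `for d, name in {…}.items():` loop: in order, return name on `host == d or host.endswith("." + d)`,
-- falling through to `return host`
def pvLoopA : List (List Char × String) → List Char → String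
  | [], host => String.ofList host
  | (d, n) :: rest, host =>
      if host == d || PySem.Chars.endswith host ('.' :: d) then n else pvLoopA rest host

def source_name_for_domain (netloc : String) : String :=
  -- host = netloc.lower().lstrip(".")   (lstrip(".") = drop leading '.': exact)
  let host0 := (PySem.Chars.lower netloc.toList).dropWhile (· == '.')
  let host := if PySem.Chars.startswith host0 "www.".toList
              then PySem.Chars.slice host0 (some 4) none else host0
  pvLoopA (PySem.Dict.ofList (pvOEM ++ pvDIST ++ pvAGG)).items host

-- ===== PORT B =====
-- the merged mapping, precomputed once as a module constant
def pvAll : List (List Char × String) :=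
  [("orientalmotor.com".toList, "Oriental Motor"),
   ("maxongroup.com".toList, "Maxon Group"),
   ("automationdirect.com".toList, "AutomationDirect"),
   ("se.com".toList, "Schneider Electric"),
   ("shop1.us.mitsubishielectric.com".toList, "Mitsubishi Electric (official store)"),
   ("galco.com".toList, "Galco"),
   ("wolfautomation.com".toList, "Wolf Automation"),
   ("motionindustries.com".toList, "Motion Industries"),
   ("newark.com".toList, "Newark"),
   ("alliedelec.com".toList, "Allied Electronics"),
   ("grainger.com".toList, "Grainger"),
   ("shop.iecsupply.com".toList, "IEC Supply"),
   ("shop.lakewoodautomation.com".toList, "Lakewood Automation"),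
   ("shop.lakelandengineering.com".toList, "Lakeland Engineering"),
   ("shop.fabco-air.com".toList, "Fabco-Air"),
   ("radwell.com".toList, "Radwell International"),
   ("plccenter.com".toList, "PLC Center")]

def pvDict : PySem.Dict (List Char) String := PySem.Dict.ofList pvAll

-- the while loop: candidates are host, then the tail after each '.' in turn
def pvCandsAux : List Char → List (List Char)
  | [] => []
  | c :: t => if c == '.' then t :: pvCandsAux t else pvCandsAux t

def pvCands (h : List Char) : List (List Char) := h :: pvCandsAux h

def source_name_for_domain_alt (netloc : String) : String :=
  let host0 := (PySem.Chars.lower netloc.toList).dropWhile (· == '.')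
  let host := if PySem.Chars.startswith host0 "www.".toList
              then PySem.Chars.slice host0 (some 4) none else host0
  match (pvCands host).findSome? (fun c => pvDict.get? c) with
  | some n => n
  | none => String.ofList host

-- ===== PRECONDITION & SPEC =====
def Spec_source_name_for_domain (netloc : String) (out : String) : Prop := out = source_name_for_domain_alt netloc
instance (netloc : String) (out : String) : Decidable (Spec_source_name_for_domain netloc out) := by unfold Spec_source_name_for_domain; infer_instance

-- ===== CLAIM (what is proved, stated in full; the proofs are below) =====
def Claim_equal_source_name_for_domain : Prop := ∀ (netloc : String), Dom_source_name_for_domain netloc → Spec_source_name_for_domain netloc (source_name_for_domain netloc)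

-- ===== LEMMAS AND PROOFS =====

-- a host matches a domain (as in A) iff it equals it or ends with "." + it
def pvMatches (host d : List Char) : Prop := host = d ∨ ('.' :: d) <:+ host

theorem pvItemsA_eq : (PySem.Dict.ofList (pvOEM ++ pvDIST ++ pvAGG)).items = pvAll := by decide

theorem pvAll_keys_nodup : (pvAll.map Prod.fst).Nodup := by decide

-- no configured domain matches another configured domain at a label boundary
theorem pvAll_keys_pairwise :
    (pvAll.map Prod.fst).Pairwise
      (fun a b => ¬ (('.' :: a) <:+ b) ∧ ¬ (('.' :: b) <:+ a)) := by decide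

-- candidates = host plus every tail that follows a '.'
theorem mem_pvCandsAux (h d : List Char) : d ∈ pvCandsAux h ↔ ('.' :: d) <:+ h := by
  induction h with
  | nil => simp [pvCandsAux]
  | cons c t ih =>
      by_cases hc : c = '.'
      · subst hc
        simp [pvCandsAux, ih, List.suffix_cons_iff]
      · have hne : ¬ (('.' :: d) = c :: t) := by
          intro h'; injection h' with h1 _; exact hc h1.symm
        simp [pvCandsAux, hc, ih, List.suffix_cons_iff, hne]

theorem mem_pvCands (h d : List Char) : d ∈ pvCands h ↔ pvMatches h d := by
  simp [pvCands, mem_pvCandsAux, pvMatches, eq_comm]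

-- if exactly one element of l produces a value under f, findSome? returns it
theorem findSome?_unique {α β : Type} (f : α → Option β) (l : List α) (a : α) (v : β)
    (ha : a ∈ l) (hv : f a = some v) (huniq : ∀ x ∈ l, f x ≠ none → x = a) :
    l.findSome? f = some v := by
  induction l with
  | nil => cases ha
  | cons x xs ih =>
      rcases List.mem_cons.1 ha with rfl | hmem
      · simp [List.findSome?, hv]
      · cases hfx : f x with
        | some w =>
            have : x = a := huniq x (List.mem_cons_self) (by simp [hfx])
            subst this
            simp [List.findSome?, hv.symm.trans hfx ▸ hfx]
        | none =>
            simp only [List.findSome?, hfx]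
            exact ih hmem (fun y hy => huniq y (List.mem_cons_of_mem _ hy))

-- first-match lookup on a literal dict, both directions
theorem get?_mk_mem {items : List (List Char × String)} {c : List Char} {n : String}
    (h : (PySem.Dict.mk items).get? c = some n) : (c, n) ∈ items := by
  induction items with
  | nil => simp [PySem.Dict.get?] at h
  | cons p rest ih =>
      obtain ⟨k, v⟩ := p
      rw [PySem.Dict.get?_mk_cons] at h
      by_cases hk : (k == c) = true
      · rw [if_pos hk] at h
        obtain rfl : v = n := by injection h
        obtain rfl : k = c := beq_iff_eq.1 hk
        exact List.mem_cons_self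
      · rw [if_neg hk] at h
        exact List.mem_cons_of_mem _ (ih h)

theorem get?_mk_of_mem {items : List (List Char × String)} {c : List Char} {n : String}
    (hnd : (items.map Prod.fst).Nodup) (h : (c, n) ∈ items) :
    (PySem.Dict.mk items).get? c = some n := by
  induction items with
  | nil => cases h
  | cons p rest ih =>
      obtain ⟨k, v⟩ := p
      rw [PySem.Dict.get?_mk_cons]
      rcases List.mem_cons.1 h with heq | hmem
      · injection heq with h1 h2
        subst h1; subst h2
        simp
      · have hk : k ≠ c := by
          intro hkc; subst hkc
          exact (List.nodup_cons.1 hnd).1 (List.mem_map.2 ⟨(k, n), hmem, rfl⟩)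
        rw [if_neg (by simpa using hk)]
        exact ih (List.nodup_cons.1 hnd).2 hmem

-- the matched key is unique among pairwise non-suffix domains
theorem pvMatches_unique {h d1 d2 : List Char}
    (h1 : pvMatches h d1) (h2 : pvMatches h d2)
    (n12 : ¬ (('.' :: d1) <:+ d2)) (n21 : ¬ (('.' :: d2) <:+ d1)) : d1 = d2 := by
  rcases h1 with rfl | hs1
  · rcases h2 with rfl | hs2
    · rfl
    · exact absurd hs2 n21
  · rcases h2 with rfl | hs2
    · exact absurd hs1 n12
    · rcases le_total ('.' :: d1).length ('.' :: d2).length with hle | hle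
      · have hsuf := List.suffix_of_suffix_length_le hs1 hs2 hle
        rcases List.suffix_cons_iff.1 hsuf with heq | hsuf'
        · exact (List.cons.injEq .. ▸ heq).2
        · exact absurd hsuf' n12
      · have hsuf := List.suffix_of_suffix_length_le hs2 hs1 hle
        rcases List.suffix_cons_iff.1 hsuf with heq | hsuf'
        · exact ((List.cons.injEq .. ▸ heq).2).symm
        · exact absurd hsuf' n21

theorem pvUnique {h d1 d2 : List Char}
    (m1 : d1 ∈ pvAll.map Prod.fst) (m2 : d2 ∈ pvAll.map Prod.fst)
    (h1 : pvMatches h d1) (h2 : pvMatches h d2) : d1 = d2 := by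
  by_cases hne : d1 = d2
  · exact hne
  · have hr := List.Pairwise.forall
      (fun {a b} hab => ⟨hab.2, hab.1⟩ :
        ∀ {a b : List Char}, (¬ (('.' :: a) <:+ b) ∧ ¬ (('.' :: b) <:+ a)) →
          (¬ (('.' :: b) <:+ a) ∧ ¬ (('.' :: a) <:+ b)))
      pvAll_keys_pairwise m1 m2 hne
    exact pvMatches_unique h1 h2 hr.1 hr.2

-- Bool form of pvMatches, as tested by A's loop
theorem matchB_iff (host d : List Char) :
    (host == d || PySem.Chars.endswith host ('.' :: d)) = true ↔ pvMatches host d := by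
  simp [pvMatches, PySem.Chars.endswith_iff]

-- A's loop when nothing matches
theorem pvLoopA_no_match (items : List (List Char × String)) (host : List Char)
    (h : ∀ p ∈ items, ¬ pvMatches host p.1) : pvLoopA items host = String.ofList host := by
  induction items with
  | nil => rfl
  | cons p rest ih =>
      obtain ⟨d, n⟩ := p
      have hd : ¬ pvMatches host d := h (d, n) List.mem_cons_self
      show (if (host == d || PySem.Chars.endswith host ('.' :: d)) = true
            then n else pvLoopA rest host) = String.ofList host
      rw [if_neg (fun hb => hd ((matchB_iff host d).1 hb))]
      exact ih (fun q hq => h q (List.mem_cons_of_mem _ hq))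

-- A's loop when (d0, n0) is the unique matching pair
theorem pvLoopA_match (items : List (List Char × String)) (host : List Char)
    (d0 : List Char) (n0 : String) (hmem : (d0, n0) ∈ items) (hm : pvMatches host d0)
    (huniq : ∀ p ∈ items, pvMatches host p.1 → p = (d0, n0)) :
    pvLoopA items host = n0 := by
  induction items with
  | nil => cases hmem
  | cons p rest ih =>
      obtain ⟨d, n⟩ := p
      by_cases hd : pvMatches host d
      · have hpq := huniq (d, n) List.mem_cons_self hd
        injection hpq with h1 h2
        subst h1; subst h2
        show (if (host == d || PySem.Chars.endswith host ('.' :: d)) = true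
              then n else pvLoopA rest host) = n
        rw [if_pos ((matchB_iff host d).2 hd)]
      · show (if (host == d || PySem.Chars.endswith host ('.' :: d)) = true
              then n else pvLoopA rest host) = n0
        rw [if_neg (fun hb => hd ((matchB_iff host d).1 hb))]
        rcases List.mem_cons.1 hmem with heq | hmem'
        · injection heq with h1 _
          exact absurd (h1 ▸ hm) hd
        · exact ih hmem' (fun q hq hmq => huniq q (List.mem_cons_of_mem _ hq) hmq)


theorem pvDict_eq : pvDict = PySem.Dict.mk pvAll := by decide

-- core equivalence: A's domain scan and B's suffix walk agree on every host
theorem pv_core (host : List Char) :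
    pvLoopA pvAll host =
      (match (pvCands host).findSome? (fun c => pvDict.get? c) with
       | some n => n
       | none => String.ofList host) := by
  by_cases hex : ∃ p ∈ pvAll, pvMatches host p.1
  · obtain ⟨⟨d0, n0⟩, hmem, hm⟩ := hex
    have hkey0 : d0 ∈ pvAll.map Prod.fst := List.mem_map.2 ⟨(d0, n0), hmem, rfl⟩
    have hget : pvDict.get? d0 = some n0 := by
      rw [pvDict_eq]; exact get?_mk_of_mem pvAll_keys_nodup hmem
    have hfind : (pvCands host).findSome? (fun c => pvDict.get? c) = some n0 := by
      refine findSome?_unique _ _ d0 n0 ((mem_pvCands host d0).2 hm) hget ?_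
      intro c hc hne
      cases hopt : pvDict.get? c with
      | none => exact absurd hopt hne
      | some m =>
          have hmemc : (c, m) ∈ pvAll := get?_mk_mem (pvDict_eq ▸ hopt)
          exact pvUnique (List.mem_map.2 ⟨(c, m), hmemc, rfl⟩) hkey0
            ((mem_pvCands host c).1 hc) hm
    rw [hfind]
    refine pvLoopA_match pvAll host d0 n0 hmem hm ?_
    rintro ⟨d, n⟩ hp hmp
    have hd : d = d0 :=
      pvUnique (List.mem_map.2 ⟨(d, n), hp, rfl⟩) hkey0 hmp hm
    subst hd
    have g1 : pvDict.get? d = some n := by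
      rw [pvDict_eq]; exact get?_mk_of_mem pvAll_keys_nodup hp
    have : n = n0 := by
      have := g1.symm.trans hget
      injection this
    rw [this]
  · simp only [not_exists, not_and] at hex
    replace hex : ∀ p ∈ pvAll, ¬ pvMatches host p.1 := fun p hp => hex p hp
    have hfind : (pvCands host).findSome? (fun c => pvDict.get? c) = none := by
      rw [List.findSome?_eq_none_iff]
      intro c hc
      cases hopt : pvDict.get? c with
      | none => rfl
      | some m =>
          have hmemc : (c, m) ∈ pvAll := get?_mk_mem (pvDict_eq ▸ hopt)
          exact absurd ((mem_pvCands host c).1 hc) (hex (c, m) hmemc)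
    rw [hfind]
    exact pvLoopA_no_match pvAll host hex

-- ===== VERDICT (by name: the statement is the Claim_ definition above) =====
theorem source_name_for_domain_spec : Claim_equal_source_name_for_domain := by
  intro netloc _
  unfold Spec_source_name_for_domain source_name_for_domain source_name_for_domain_alt
  rw [pvItemsA_eq]
  exact pv_core _
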